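-- pv_equiv track=rewrite | github.com/ecfeinstone/Machine-Learning | assignment_4/train.py | generate_players
-- ===== SOURCE A (Python) =====
-- import string
-- import itertools
--
-- PLAYER_SYMBOLS = string.digits + string.ascii_uppercase + string.ascii_lowercase + string.punctuation.replace('.', '')
--
-- def generate_players(n_players):
--     players = []
--     symbol_length = 1
--     while len(players) < n_players:
--         for combo in itertools.product(PLAYER_SYMBOLS, repeat=symbol_length):
--             players.append(''.join(combo))
--             if len(players) == n_players:
--                 break
--         symbol_length += 1
--     return players
-- ===== SOURCE B (Python) =====
-- import string
--
-- PLAYER_SYMBOLS = string.digits + string.ascii_uppercase + string.ascii_lowercase + string.punctuation.replace('.', '')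
--
-- def generate_players(n_players):
--     base = len(PLAYER_SYMBOLS)
--     players = []
--     for i in range(1, n_players + 1):
--         chars = []
--         while i > 0:
--             q, r = divmod(i, base)
--             if r == 0:
--                 r = base
--                 q -= 1
--             chars.append(PLAYER_SYMBOLS[r - 1])
--             i = q
--         players.append(''.join(reversed(chars)))
--     return players
-- ===== Notes on version B (the rewrite author's own statement) =====
-- stated objective: alternative
-- what changed: A incrementally enumerates all symbol tuples length by length via itertools.product until enough players exist; B computes each player independently by converting its one-based index to bijective base-93 over PLAYER_SYMBOLS.
import Mathlib
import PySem

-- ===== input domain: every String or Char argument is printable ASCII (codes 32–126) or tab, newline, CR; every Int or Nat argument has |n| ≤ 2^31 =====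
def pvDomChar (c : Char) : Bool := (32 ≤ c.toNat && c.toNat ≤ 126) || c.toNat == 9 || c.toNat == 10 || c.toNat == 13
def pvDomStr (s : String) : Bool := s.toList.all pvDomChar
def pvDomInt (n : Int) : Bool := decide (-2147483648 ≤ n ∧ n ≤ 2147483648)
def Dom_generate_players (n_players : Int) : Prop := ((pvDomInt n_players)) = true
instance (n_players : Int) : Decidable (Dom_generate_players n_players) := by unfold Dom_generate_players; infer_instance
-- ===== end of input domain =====

-- B replaces A's incremental enumeration of all symbol strings by a per-index
-- bijective base-93 conversion (objective: alternative; same output, same order).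

-- PLAYER_SYMBOLS = string.digits + string.ascii_uppercase + string.ascii_lowercase + string.punctuation.replace('.', '')  (93 chars)
def SYMS : List Char := ['0', '1', '2', '3', '4', '5', '6', '7', '8', '9', 'A', 'B', 'C', 'D', 'E', 'F', 'G', 'H', 'I', 'J', 'K', 'L', 'M', 'N', 'O', 'P', 'Q', 'R', 'S', 'T', 'U', 'V', 'W', 'X', 'Y', 'Z', 'a', 'b', 'c', 'd', 'e', 'f', 'g', 'h', 'i', 'j', 'k', 'l', 'm', 'n', 'o', 'p', 'q', 'r', 's', 't', 'u', 'v', 'w', 'x', 'y', 'z', '!', '"', '#', '$', '%', '&', '\'', '(', ')', '*', '+', ',', '-', '/', ':', ';', '<', '=', '>', '?', '@', '[', '\\', ']', '^', '_', '`', '{', '|', '}', '~']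

-- ===== PORT A =====
-- itertools.product(PLAYER_SYMBOLS, repeat=l): all length-l tuples in product order (last coordinate fastest)
def productRep (l : Nat) : List (List Char) :=
  match l with
  | 0 => [[]]
  | Nat.succ k => (productRep k).flatMap (fun t => SYMS.map (fun c => t ++ [c]))

-- the inner 'for combo in product(...): players.append(...); if len(players) == n_players: break'
def appendUntil (n : Int) (players : List String) (combos : List (List Char)) : List String :=
  match combos with
  | [] => players
  | c :: cs =>
    let p := players ++ [String.mk c]
    if (p.length : Int) == n then p else appendUntil n p cs

theorem appendUntil_len_le (n : Int) : ∀ (combos : List (List Char)) (players : List String),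
    players.length ≤ (appendUntil n players combos).length := by
  intro combos
  induction combos with
  | nil => intro players; simp [appendUntil]
  | cons c cs ih =>
      intro players
      simp only [appendUntil]
      split
      · simp
      · exact le_trans (by simp) (ih (players ++ [String.mk c]))

theorem appendUntil_len_lt (n : Int) (combos : List (List Char)) (players : List String)
    (h : combos ≠ []) : players.length < (appendUntil n players combos).length := by
  cases combos with
  | nil => exact absurd rfl h
  | cons c cs =>
      simp only [appendUntil]
      split
      · simp
      · exact lt_of_lt_of_le (by simp) (appendUntil_len_le n cs (players ++ [String.mk c]))

theorem productRep_ne_nil : ∀ l, productRep l ≠ [] := by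
  intro l
  induction l with
  | zero => simp [productRep]
  | succ k ih =>
      simp only [productRep]
      cases h : productRep k with
      | nil => exact absurd h ih
      | cons t ts =>
          simp only [List.flatMap_cons]
          exact List.append_ne_nil_of_left_ne_nil (by simp [SYMS]) _

-- the outer 'while len(players) < n_players' loop
def loopA (n : Int) (players : List String) (l : Nat) : List String :=
  if h : (players.length : Int) < n then
    loopA n (appendUntil n players (productRep l)) (l + 1)
  else players
termination_by (n - players.length).toNat
decreasing_by
  have h1 := appendUntil_len_lt n (productRep l) players (productRep_ne_nil l)
  omega

def generate_players (n_players : Int) : List String := loopA n_players [] 1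

-- ===== PORT B =====
-- the inner 'while i > 0' digit loop of Source B; chars collects the digits in append order
def bijChars (i : Int) (chars : List Char) : List Char :=
  if hpos : 0 < i then
    let q := PySem.Int.floordiv i 93
    let r := PySem.Int.mod i 93
    if r == 0 then
      bijChars (q - 1) (chars ++ [PySem.List.pyGetD SYMS ((93 : Int) - 1) ' '])
    else
      bijChars q (chars ++ [PySem.List.pyGetD SYMS (r - 1) ' '])
  else chars
termination_by i.toNat
decreasing_by
  · have hq : PySem.Int.floordiv i 93 = i / 93 := PySem.Int.floordiv_eq_ediv_of_pos (by omega)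
    have h2 : i / 93 < i := Int.ediv_lt_of_lt_mul (by omega) (by nlinarith)
    have h3 : 0 ≤ i / 93 := Int.ediv_nonneg (le_of_lt hpos) (by omega)
    omega
  · have hq : PySem.Int.floordiv i 93 = i / 93 := PySem.Int.floordiv_eq_ediv_of_pos (by omega)
    have h2 : i / 93 < i := Int.ediv_lt_of_lt_mul (by omega) (by nlinarith)
    have h3 : 0 ≤ i / 93 := Int.ediv_nonneg (le_of_lt hpos) (by omega)
    omega

def generate_players_alt (n_players : Int) : List String :=
  (PySem.List.pyRange 1 (n_players + 1) 1).map (fun i => String.mk ((bijChars i []).reverse))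

-- ===== PRECONDITION & SPEC =====
def Spec_generate_players (n_players : Int) (out : List String) : Prop := out = generate_players_alt n_players
instance (n_players : Int) (out : List String) : Decidable (Spec_generate_players n_players out) := by unfold Spec_generate_players; infer_instance

-- ===== CLAIM (what is proved, stated in full; the proofs are below) =====
def Claim_equal_generate_players : Prop := ∀ (n_players : Int), Dom_generate_players n_players → Spec_generate_players n_players (generate_players n_players)

-- ===== LEMMAS AND PROOFS =====

-- the i-th string (1-indexed) of the enumeration, most-significant digit first
def bijF (i : Nat) : List Char :=
  if _h : i = 0 then [] else bijF ((i - 1) / 93) ++ [SYMS.getD ((i - 1) % 93) ' ']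
termination_by i
decreasing_by omega

def bstr (i : Nat) : String := String.mk (bijF i)

-- number of strings of length at most l
def off (l : Nat) : Nat :=
  match l with
  | 0 => 0
  | Nat.succ k => 93 * off k + 93

theorem off_succ (l : Nat) : off (l + 1) = off l + 93 ^ (l + 1) := by
  induction l with
  | zero => simp [off]
  | succ k ih =>
      show 93 * off (k + 1) + 93 = off (k + 1) + 93 ^ (k + 2)
      rw [show off (k + 1) = 93 * off k + 93 from rfl] at ih ⊢
      rw [pow_succ]
      omega

theorem map_eq_range_getD {α β : Type} (l : List α) (f : α → β) (d : α) :
    l.map f = (List.range l.length).map (fun j => f (l.getD j d)) := by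
  induction l with
  | nil => rfl
  | cons a l ih =>
      simp only [List.map_cons, List.length_cons, List.range_succ_eq_map, List.map_map]
      rw [ih]
      simp [Function.comp]

theorem bijF_zero : bijF 0 = [] := by rw [bijF]; simp

theorem syms_block (p : Nat) :
    SYMS.map (fun c => bijF p ++ [c]) = (List.range' (93 * p + 1) 93).map bijF := by
  rw [List.range'_eq_map_range, List.map_map]
  rw [map_eq_range_getD SYMS (fun c => bijF p ++ [c]) ' ']
  rw [show SYMS.length = 93 from rfl]
  apply List.map_congr_left
  intro j hj
  simp only [List.mem_range] at hj
  show bijF p ++ [SYMS.getD j ' '] = bijF (93 * p + 1 + j)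
  conv_rhs => rw [bijF]
  rw [dif_neg (by omega)]
  have h1 : (93 * p + 1 + j - 1) / 93 = p := by omega
  have h2 : (93 * p + 1 + j - 1) % 93 = j := by omega
  rw [h1, h2]

theorem block_concat : ∀ (cnt a : Nat),
    (List.range' a cnt).flatMap (fun p => (List.range' (93 * p + 1) 93).map bijF)
      = (List.range' (93 * a + 1) (93 * cnt)).map bijF := by
  intro cnt
  induction cnt with
  | zero => intro a; simp
  | succ m ih =>
      intro a
      rw [List.range'_succ, List.flatMap_cons, ih (a + 1)]
      rw [show 93 * (a + 1) + 1 = (93 * a + 1) + 1 * 93 by ring]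
      rw [← List.map_append, List.range'_append]
      rw [show 93 + 93 * m = 93 * (m + 1) by ring]

theorem productRep_eq : ∀ l, productRep (l + 1) = (List.range' (off l + 1) (93 ^ (l + 1))).map bijF := by
  intro l
  induction l with
  | zero =>
      show ([([] : List Char)]).flatMap (fun t => SYMS.map (fun c => t ++ [c]))
        = (List.range' (off 0 + 1) (93 ^ 1)).map bijF
      rw [List.flatMap_cons, List.flatMap_nil, List.append_nil]
      have : SYMS.map (fun c => ([] : List Char) ++ [c]) = SYMS.map (fun c => bijF 0 ++ [c]) := by
        simp [bijF_zero]
      rw [this, syms_block 0]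
      simp [off]
  | succ m ih =>
      show (productRep (m + 1)).flatMap (fun t => SYMS.map (fun c => t ++ [c]))
        = (List.range' (off (m + 1) + 1) (93 ^ (m + 2))).map bijF
      rw [ih, List.flatMap_map]
      simp only [syms_block]
      rw [block_concat (93 ^ (m + 1)) (off m + 1)]
      rw [show 93 * (off m + 1) + 1 = off (m + 1) + 1 from by show _ = 93 * off m + 93 + 1; ring]
      rw [show 93 * 93 ^ (m + 1) = 93 ^ (m + 2) from by rw [pow_succ]; ring]

theorem take_range' : ∀ (m k s : Nat), (List.range' s m).take k = List.range' s (min k m) := by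
  intro m
  induction m with
  | zero => simp
  | succ m ih =>
      intro k s
      cases k with
      | zero => simp
      | succ k =>
          rw [List.range'_succ, List.take_succ_cons, ih k (s + 1)]
          rw [show min (k + 1) (m + 1) = min k m + 1 by omega, List.range'_succ]

theorem appendUntil_eq (n : Int) : ∀ (combos : List (List Char)) (players : List String),
    (players.length : Int) < n →
    appendUntil n players combos
      = players ++ (combos.take (min combos.length (n - players.length).toNat)).map String.mk := by
  intro combos
  induction combos with
  | nil => intro players _; simp [appendUntil]
  | cons c cs ih =>
      intro players h
      simp only [appendUntil]
      have hp : ((players ++ [String.mk c]).length : Int) = (players.length : Int) + 1 := by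
        simp
      by_cases hb : (players.length : Int) + 1 = n
      · rw [if_pos (by simp [hp, hb])]
        simp only [List.length_cons]
        rw [show min (cs.length + 1) (n - (players.length : Int)).toNat = 1 by omega]
        simp
      · rw [if_neg (by simp [hp]; omega)]
        rw [ih (players ++ [String.mk c]) (by rw [hp]; omega)]
        simp only [List.length_append, List.length_cons, List.length_nil]
        rw [show min (cs.length + 1) (n - (players.length : Int)).toNat
            = min cs.length (n - ((players.length : Nat) + 1 : Nat)).toNat + 1 by push_cast; omega]
        rw [List.take_succ_cons, List.map_cons]
        simp

theorem loopA_eq : ∀ (fuel : Nat) (n : Int) (l : Nat), (off l : Int) < n → (n - off l).toNat ≤ fuel →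
    loopA n ((List.range' 1 (off l)).map bstr) (l + 1) = (List.range' 1 n.toNat).map bstr := by
  intro fuel
  induction fuel with
  | zero => intro n l h1 h2; omega
  | succ fuel ih =>
      intro n l h1 h2
      have hpow : 0 < 93 ^ (l + 1) := pow_pos (by norm_num) _
      rw [loopA, dif_pos (by simp; omega)]
      rw [appendUntil_eq n _ _ (by simp; omega)]
      simp only [List.length_map, List.length_range']
      rw [productRep_eq l]
      simp only [List.length_map, List.length_range']
      rw [← List.map_take, take_range']
      set d : Nat := (n - (off l : Int)).toNat with hd
      set K : Nat := min (93 ^ (l + 1)) d with hK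
      rw [show min K (93 ^ (l + 1)) = K by omega]
      rw [List.map_map]
      rw [show (String.mk ∘ bijF) = bstr from rfl]
      rw [← List.map_append]
      rw [show off l + 1 = 1 + 1 * off l by ring, List.range'_append]
      by_cases hc : d ≤ 93 ^ (l + 1)
      · have hKd : K = d := by omega
        have hfin : off l + K = n.toNat := by omega
        rw [hfin]
        rw [loopA, dif_neg (by simp)]
      · have hKp : K = 93 ^ (l + 1) := by omega
        have hoff : off l + K = off (l + 1) := by rw [hKp, off_succ]
        rw [hoff]
        have hos : off (l + 1) = off l + 93 ^ (l + 1) := off_succ l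
        have hdgt : 93 ^ (l + 1) < d := by omega
        exact ih n (l + 1) (by omega) (by omega)

theorem bijChars_eq : ∀ (k : Nat) (i : Int), i.toNat ≤ k → 0 ≤ i → ∀ acc,
    bijChars i acc = acc ++ (bijF i.toNat).reverse := by
  intro k
  induction k with
  | zero =>
      intro i h1 h2 acc
      have hi : i = 0 := by omega
      subst hi
      rw [bijChars, dif_neg (by omega)]
      simp [bijF_zero]
  | succ k ih =>
      intro i h1 h2 acc
      by_cases h0 : i = 0
      · subst h0
        rw [bijChars, dif_neg (by omega)]
        simp [bijF_zero]
      · have hpos : 0 < i := by omega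
        set m : Nat := i.toNat with hm
        have him : i = (m : Int) := by omega
        have hm1 : 1 ≤ m := by omega
        have hfd : PySem.Int.floordiv i 93 = ((m / 93 : Nat) : Int) := by
          rw [him]; exact_mod_cast PySem.Int.floordiv_natCast m 93
        have hmd : PySem.Int.mod i 93 = ((m % 93 : Nat) : Int) := by
          rw [him]; exact_mod_cast PySem.Int.mod_natCast m 93
        rw [bijChars, dif_pos (by omega)]
        simp only [hfd, hmd]
        by_cases hr : m % 93 = 0
        · rw [if_pos (by simp [hr])]
          have h93 : 93 ≤ m := by omega
          have hg : PySem.List.pyGetD SYMS ((93 : Int) - 1) ' ' = SYMS.getD 92 ' ' := by decide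
          have hq1 : ((m / 93 : Nat) : Int) - 1 = ((m / 93 - 1 : Nat) : Int) := by
            have : 1 ≤ m / 93 := by omega
            omega
          rw [hg, hq1, ih ((m / 93 - 1 : Nat) : Int) (by simp; omega) (by positivity)]
          conv_rhs => rw [bijF]
          rw [dif_neg (by omega)]
          rw [show (m - 1) / 93 = m / 93 - 1 by omega, show (m - 1) % 93 = 92 by omega]
          simp
        · rw [if_neg (by simp; omega)]
          have hq1 : ((m % 93 : Nat) : Int) - 1 = ((m % 93 - 1 : Nat) : Int) := by omega
          rw [hq1, PySem.List.pyGetD_natCast]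
          rw [ih ((m / 93 : Nat) : Int) (by simp; omega) (by positivity)]
          conv_rhs => rw [bijF]
          rw [dif_neg (by omega)]
          rw [show (m - 1) / 93 = m / 93 by omega, show (m - 1) % 93 = m % 93 - 1 by omega]
          simp
          rw [show ((m : Int) / 93).toNat = m / 93 by omega]

theorem main_eq (n : Int) : generate_players n = generate_players_alt n := by
  by_cases hn : n ≤ 0
  · show loopA n [] 1 = generate_players_alt n
    rw [loopA, dif_neg (by simp; omega)]
    unfold generate_players_alt
    rw [PySem.List.pyRange_one]
    rw [show (n + 1 - 1).toNat = 0 by omega]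
    simp
  · have hn' : 0 < n := by omega
    show loopA n [] 1 = generate_players_alt n
    have h0 : ([] : List String) = (List.range' 1 (off 0)).map bstr := by simp [off]
    rw [h0, show (1 : Nat) = 0 + 1 from rfl]
    rw [loopA_eq (n - (off 0 : Int)).toNat n 0 (by simp [off]; omega) le_rfl]
    unfold generate_players_alt
    rw [PySem.List.pyRange_one, List.map_map, List.range'_eq_map_range, List.map_map]
    rw [show (n + 1 - 1).toNat = n.toNat by omega]
    apply List.map_congr_left
    intro j hj
    simp only [List.mem_range] at hj
    show bstr (1 + j) = String.mk ((bijChars ((1 : Int) + (j : Nat)) []).reverse)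
    rw [bijChars_eq ((1 : Int) + (j : Nat)).toNat _ le_rfl (by positivity) []]
    rw [show ((1 : Int) + (j : Nat)).toNat = 1 + j by omega]
    simp [bstr]

-- ===== VERDICT (by name: the statement is the Claim_ definition above) =====
theorem generate_players_spec : Claim_equal_generate_players := by
  intro n _
  show generate_players n = generate_players_alt n
  exact main_eq n
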